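-- pv_equiv track=rewrite | github.com/FZcuber/Keep_Your_Receipt | api/target.py | check_meat
-- ===== SOURCE A (Python) =====
-- def check_meat(s):
--     '''
--     Given list of breadcrumbs, return if is meat
--     '''
--
--     meat = False
--
--     for i in s:
--         if meat:
--             return True, i['name']
--
--         if 'meat' in i['name'].lower():
--             meat = True
--     return meat, ''
-- ===== SOURCE B (Python) =====
-- def check_meat(s):
--     # Backwards fold: walk the breadcrumbs from the end, carrying the name of the
--     # item just behind us; every match overwrites the result, so the FIRST match wins.
--     res = (False, '')
--     nxt = ''
--     for i in reversed(s):
--         name = i['name']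
--         if 'meat' in name.lower():
--             res = (True, nxt)
--         nxt = name
--     return res
-- ===== Notes on version B (the rewrite author's own statement) =====
-- stated objective: alternative
-- what changed: Replaces the forward flag state machine with early return by a reverse fold with no early exit: it walks the list back-to-front carrying the successor's name, each match overwrites the result so the first match wins.
-- outside the precondition, e.g. on check_meat([{'name': 'meat'}, {'name': 'x'}, {}]): A returns (True, 'x'), B raises KeyError
import Mathlib
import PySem

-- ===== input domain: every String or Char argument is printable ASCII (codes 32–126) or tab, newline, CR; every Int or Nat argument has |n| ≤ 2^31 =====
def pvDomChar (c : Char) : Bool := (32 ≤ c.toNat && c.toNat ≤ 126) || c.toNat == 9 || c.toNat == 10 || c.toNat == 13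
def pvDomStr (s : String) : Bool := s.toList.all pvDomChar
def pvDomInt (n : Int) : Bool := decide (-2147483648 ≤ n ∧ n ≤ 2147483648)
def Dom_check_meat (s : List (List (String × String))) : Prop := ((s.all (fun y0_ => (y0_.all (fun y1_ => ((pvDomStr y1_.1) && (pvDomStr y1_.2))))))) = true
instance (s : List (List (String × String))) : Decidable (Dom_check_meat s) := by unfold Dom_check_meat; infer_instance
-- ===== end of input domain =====

-- B replaces A's forward flag state machine by a reverse fold (no early exit) that
-- carries the successor's name; objective: alternative. Equivalence is about return values.

-- ===== PORT A =====
-- the loop: 'meat' is the carried flag; i['name'] ported as Dict.getD (total under Pre_)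
def chkGo : List (List (String × String)) → Bool → Bool × String
  | [], meat => (meat, "")
  | i :: rest, meat =>
    if meat then (true, PySem.Dict.getD ⟨i⟩ "name" "")
    else if PySem.Str.isIn "meat" (PySem.Str.lower (PySem.Dict.getD ⟨i⟩ "name" "")) then
      chkGo rest true
    else
      chkGo rest false

def check_meat (s : List (List (String × String))) : Bool × String := chkGo s false

-- ===== PORT B =====
-- loop body of 'for i in reversed(s)': state = (res, nxt)
def chkAltStep (st : (Bool × String) × String) (i : List (String × String)) :
    (Bool × String) × String :=
  let name := PySem.Dict.getD ⟨i⟩ "name" ""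
  (if PySem.Str.isIn "meat" (PySem.Str.lower name) then (true, st.2) else st.1, name)

def check_meat_alt (s : List (List (String × String))) : Bool × String :=
  (s.reverse.foldl chkAltStep ((false, ""), "")).1

-- ===== PRECONDITION & SPEC =====
-- Pre_ requires every breadcrumb to carry a 'name' key: A raises KeyError on items it
-- scans without one, and tolerates a missing key only in items past the matched one
-- (because it stops early) — an accident of its early exit; B reads every item's name.
def Pre_check_meat (s : List (List (String × String))) : Prop :=
  ∀ i ∈ s, PySem.Dict.contains (⟨i⟩ : PySem.Dict String String) "name" = true
instance (s : List (List (String × String))) : Decidable (Pre_check_meat s) := by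
  unfold Pre_check_meat; infer_instance
def pvWitness_check_meat : (List (List (String × String))) :=
  [[("name", "Fresh Meat")], [("name", "Beef")]]
def Spec_check_meat (s : List (List (String × String))) (out : Bool × String) : Prop :=
  out = check_meat_alt s
instance (s : List (List (String × String))) (out : Bool × String) :
    Decidable (Spec_check_meat s out) := by unfold Spec_check_meat; infer_instance

-- ===== CLAIM =====
def Claim_equal_check_meat : Prop :=
  ∀ (s : List (List (String × String))), Dom_check_meat s → Pre_check_meat s →
    Spec_check_meat s (check_meat s)

-- ===== LEMMAS AND PROOFS =====

-- name of the first item (what B's carried 'nxt' equals after the whole reverse fold)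
def headName : List (List (String × String)) → String
  | [] => ""
  | i :: _ => PySem.Dict.getD ⟨i⟩ "name" ""

theorem chkGo_true (s : List (List (String × String))) :
    chkGo s true = (true, headName s) := by
  cases s <;> simp [chkGo, headName]

theorem foldr_spec (s : List (List (String × String))) :
    s.foldr (fun i st => chkAltStep st i) ((false, ""), "") = (chkGo s false, headName s) := by
  induction s with
  | nil => simp [chkGo, headName]
  | cons i rest ih =>
    rw [List.foldr_cons]
    show chkAltStep (List.foldr (fun i st => chkAltStep st i) ((false, ""), "") rest) i = _
    rw [ih]
    simp only [chkAltStep, chkGo]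
    split <;> simp [chkGo_true, chkGo, headName]

-- ===== VERDICT =====
theorem check_meat_spec : Claim_equal_check_meat := by
  intro s _ _
  unfold Spec_check_meat check_meat check_meat_alt
  rw [List.foldl_reverse, foldr_spec]
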